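-- pv_equiv track=rewrite | github.com/grtjatinpal/HackerRank | Nested_list_N_student.py | find_second_lowest_students
-- ===== SOURCE A (Python) =====
-- def find_second_lowest_students(record):
--     # 'inf' Python mein infinity (anant) ko represent karne ke liye ek special floating-point value hai.
--     lowest_grade = float('inf')
--     second_lowest_grade = float('inf')
--     count = 0
--
--     # Find second lowest student
--     for student_score in record:
--         score = student_score[1]
--
--         # Agar yeh grade current lowest grade se kam hai
--         if score < lowest_grade:
--             second_lowest_grade = lowest_grade
--             count = 1
--             lowest_grade = score
--
--         # Agar yeh grade doosre lowest grade ke barabar hai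
--         elif second_lowest_grade == score:
--             count += 1
--
--         # Agar yeh second_lowest kam hain
--         # elif(score > lowest_grade and score < second_lowest_grade):
--         elif lowest_grade < score < second_lowest_grade:
--             second_lowest_grade = score
--
--     second_lowest_students = []
--     # second lowest grade wale students ka name and Grade list mein daalein
--     for student_score in record:
--         if student_score[1] == second_lowest_grade:
--             second_lowest_students.append(student_score[0])
--
--     return second_lowest_students
-- ===== SOURCE B (Python) =====
-- def find_second_lowest_students(record):
--     grades = sorted(set(score for _, score in record))
--     if len(grades) < 2:
--         return []
--     target = grades[1]
--     return [name for name, score in record if score == target]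
-- ===== Notes on version B (the rewrite author's own statement) =====
-- stated objective: simpler
-- what changed: Replaces A's single-pass running lowest/second-lowest tracking (with an inf sentinel and branch cascade) by sorting the distinct grades and indexing the second one, then filtering the names.
import Mathlib
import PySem

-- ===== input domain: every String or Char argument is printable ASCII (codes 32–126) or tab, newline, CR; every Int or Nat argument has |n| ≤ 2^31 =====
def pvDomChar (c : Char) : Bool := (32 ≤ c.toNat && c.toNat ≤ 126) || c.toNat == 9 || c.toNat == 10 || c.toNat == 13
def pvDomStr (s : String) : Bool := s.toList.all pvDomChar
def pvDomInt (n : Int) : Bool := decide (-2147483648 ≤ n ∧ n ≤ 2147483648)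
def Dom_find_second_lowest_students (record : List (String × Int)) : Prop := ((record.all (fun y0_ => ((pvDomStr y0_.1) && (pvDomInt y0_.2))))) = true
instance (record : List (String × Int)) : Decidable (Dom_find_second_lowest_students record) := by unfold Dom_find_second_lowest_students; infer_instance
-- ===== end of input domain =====

-- B replaces A's single-pass lowest/second-lowest tracking by sorting the distinct grades
-- and indexing the second one (simpler decomposition; not claimed faster).


-- ===== PORT A =====
-- float('inf') is modelled by `none : Option Int`: every Int is < none, none is < nothing,
-- and `none == score` is false — exactly how the inf sentinel behaves against int grades.
def pvLtInf (x : Int) (o : Option Int) : Bool :=      -- x < o  (o possibly inf)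
  match o with | none => true | some v => decide (x < v)

def pvInfLt (o : Option Int) (x : Int) : Bool :=      -- o < x  (o possibly inf)
  match o with | none => false | some v => decide (v < x)

def pvInfEq (o : Option Int) (x : Int) : Bool :=      -- o == x  (o possibly inf)
  match o with | none => false | some v => decide (v = x)

-- one iteration of A's first loop: state = (lowest_grade, second_lowest_grade, count)
def pvStep (st : Option Int × Option Int × Int) (score : Int) : Option Int × Option Int × Int :=
  if pvLtInf score st.1 then (some score, st.1, 1)
  else if pvInfEq st.2.1 score then (st.1, st.2.1, st.2.2 + 1)
  else if pvInfLt st.1 score && pvLtInf score st.2.1 then (st.1, some score, st.2.2)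
  else st

def find_second_lowest_students (record : List (String × Int)) : List String :=
  let final := record.foldl (fun st p => pvStep st p.2) (none, none, 0)
  record.foldl (fun acc p => if pvInfEq final.2.1 p.2 then acc ++ [p.1] else acc) []

-- ===== PORT B =====
def find_second_lowest_students_alt (record : List (String × Int)) : List String :=
  let grades := PySem.List.sorted (PySem.Set.ofList (record.map Prod.snd)) (fun x => x) false
  match grades with
  | _ :: g1 :: _ => (record.filter (fun p => p.2 == g1)).map Prod.fst
  | _ => []

-- ===== PRECONDITION & SPEC =====
def Spec_find_second_lowest_students (record : List (String × Int)) (out : List String) : Prop := out = find_second_lowest_students_alt record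
instance (record : List (String × Int)) (out : List String) : Decidable (Spec_find_second_lowest_students record out) := by unfold Spec_find_second_lowest_students; infer_instance

-- ===== CLAIM (what is proved, stated in full; the proofs are below) =====
def Claim_equal_find_second_lowest_students : Prop := ∀ (record : List (String × Int)), Dom_find_second_lowest_students record → Spec_find_second_lowest_students record (find_second_lowest_students record)

-- ===== LEMMAS AND PROOFS =====

-- characterisation of A's loop state over the list of scores xs:
-- lo is the minimum (none iff empty), se is the least score strictly above lo (none iff there is none).
def pvInv (xs : List Int) (lo se : Option Int) : Prop :=
  (lo = none ↔ xs = []) ∧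
  (∀ v, lo = some v → v ∈ xs ∧ ∀ y ∈ xs, v ≤ y) ∧
  (se = none ↔ ∀ y ∈ xs, pvInfLt lo y = false) ∧
  (∀ w, se = some w → w ∈ xs ∧ pvInfLt lo w = true ∧ ∀ y ∈ xs, pvInfLt lo y = true → w ≤ y)

theorem pvInv_unique {xs : List Int} {lo se lo' se' : Option Int}
    (h : pvInv xs lo se) (h' : pvInv xs lo' se') : lo = lo' ∧ se = se' := by
  obtain ⟨he, hs, hn, hw⟩ := h
  obtain ⟨he', hs', hn', hw'⟩ := h'
  have hlo : lo = lo' := by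
    cases lo with
    | none =>
      cases lo' with
      | none => rfl
      | some v' => exact absurd ((hs' v' rfl).1) (by simp [he.mp rfl])
    | some v =>
      cases lo' with
      | none => exact absurd ((hs v rfl).1) (by simp [he'.mp rfl])
      | some v' =>
        obtain ⟨hm, hmin⟩ := hs v rfl
        obtain ⟨hm', hmin'⟩ := hs' v' rfl
        have := hmin v' hm'; have := hmin' v hm
        simp; omega
  subst hlo
  refine ⟨rfl, ?_⟩
  cases se with
  | none =>
    cases se' with
    | none => rfl
    | some w' => exact absurd ((hw' w' rfl).2.1) (by simp [hn.mp rfl _ (hw' w' rfl).1])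
  | some w =>
    cases se' with
    | none => exact absurd ((hw w rfl).2.1) (by simp [hn'.mp rfl _ (hw w rfl).1])
    | some w' =>
      obtain ⟨hm, hgt, hmin⟩ := hw w rfl
      obtain ⟨hm', hgt', hmin'⟩ := hw' w' rfl
      have := hmin w' hm' hgt'; have := hmin' w hm hgt
      simp; omega

theorem pvStep_preserves {xs : List Int} {lo se : Option Int} {c : Int}
    (h : pvInv xs lo se) (x : Int) :
    pvInv (xs ++ [x]) (pvStep (lo, se, c) x).1 (pvStep (lo, se, c) x).2.1 := by
  obtain ⟨he, hs, hn, hw⟩ := h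
  unfold pvStep
  by_cases h1 : pvLtInf x lo = true
  · -- x < lo : new state (some x, lo)
    simp only [h1, if_pos]
    refine ⟨by simp, ?_, ?_, ?_⟩
    · intro v hv
      cases hv
      constructor
      · simp
      · intro y hy
        rcases List.mem_append.mp hy with hy | hy
        · rcases lo with _ | v
          · simp [he.mp rfl] at hy
          · have := (hs v rfl).2 y hy
            simp [pvLtInf] at h1; omega
        · simp at hy; omega
    · rcases lo with _ | v
      · simp [he.mp rfl, pvInfLt]
      · constructor
        · intro h; cases h
        · intro hall
          have := hall v (by exact List.mem_append.mpr (Or.inl (hs v rfl).1))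
          simp [pvInfLt] at this
          simp [pvLtInf] at h1
          omega
    · intro w hw2
      rcases lo with _ | v
      · cases hw2
      · cases hw2
        simp [pvLtInf] at h1
        refine ⟨List.mem_append.mpr (Or.inl (hs w rfl).1), by simp [pvInfLt]; omega, ?_⟩
        intro y hy hlt
        simp [pvInfLt] at hlt
        rcases List.mem_append.mp hy with hy | hy
        · exact (hs w rfl).2 y hy
        · simp at hy; omega
  · -- x ≥ lo, so lo = some v with v ≤ x, xs ≠ []
    rcases lo with _ | v
    · simp [pvLtInf] at h1
    simp only [h1, if_neg, Bool.not_eq_true]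
    have hxs : xs ≠ [] := by intro h; simp [h] at he
    obtain ⟨hvmem, hvmin⟩ := hs v rfl
    have hvx : v ≤ x := by simp [pvLtInf] at h1; omega
    have hlo' : ∀ (se' : Option Int), (∀ v', some v = some v' → v' ∈ xs ++ [x] ∧ ∀ y ∈ xs ++ [x], v' ≤ y) := by
      intro se' v' hv'; cases hv'
      refine ⟨List.mem_append.mpr (Or.inl hvmem), ?_⟩
      intro y hy
      rcases List.mem_append.mp hy with hy | hy
      · exact hvmin y hy
      · simp at hy; omega
    by_cases h2 : pvInfEq se x = true
    · -- x equals the current second: state unchanged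
      simp only [h2, if_pos]
      rcases se with _ | w
      · simp [pvInfEq] at h2
      have hwx : w = x := by simp [pvInfEq] at h2; omega
      obtain ⟨hwm, hwgt, hwmin⟩ := hw w rfl
      refine ⟨by simp [hxs], hlo' (some w), ?_, ?_⟩
      · constructor
        · intro h; cases h
        · intro hall
          have := hall w (List.mem_append.mpr (Or.inl hwm))
          rw [hwgt] at this
          cases this
      · intro w' hw'; cases hw'
        refine ⟨List.mem_append.mpr (Or.inl hwm), hwgt, ?_⟩
        intro y hy hlt
        rcases List.mem_append.mp hy with hy | hy
        · exact hwmin y hy hlt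
        · simp at hy; omega
    · by_cases h3 : (pvInfLt (some v) x && pvLtInf x se) = true
      · -- lo < x < se : new second = x
        simp only [h2, h3, if_pos, if_neg, Bool.not_eq_true]
        simp only [Bool.and_eq_true] at h3
        refine ⟨by simp [hxs], hlo' (some x), ?_, ?_⟩
        · constructor
          · intro h; cases h
          · intro hall
            have := hall x (by simp)
            rw [h3.1] at this
            cases this
        intro w' hw'; cases hw'
        refine ⟨by simp, h3.1, ?_⟩
        intro y hy hlt
        rcases List.mem_append.mp hy with hy | hy
        · rcases se with _ | w
          · exact absurd hlt (by simp [hn.mp rfl y hy])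
          · have := (hw w rfl).2.2 y hy hlt
            simp [pvLtInf] at h3; omega
        · simp at hy; omega
      · -- x = lo, or x ≥ se : state unchanged
        simp only [h2, h3, if_neg, Bool.not_eq_true]
        have hx2 : v = x ∨ (∃ w, se = some w ∧ w ≤ x) := by
          rcases se with _ | w
          · left
            simp [pvInfLt, pvLtInf] at h3
            omega
          · by_cases hvx' : v = x
            · left; exact hvx'
            · right
              refine ⟨w, rfl, ?_⟩
              simp [pvInfLt, pvLtInf] at h3
              have := h3 (by omega)
              omega
        refine ⟨by simp [hxs], hlo' se, ?_, ?_⟩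
        · constructor
          · intro hse y hy
            rcases List.mem_append.mp hy with hy | hy
            · exact hn.mp hse y hy
            · simp at hy; subst hy
              rcases hx2 with h | ⟨w, hw', _⟩
              · simp [pvInfLt]; omega
              · simp [hw'] at hse
          · intro hall
            exact hn.mpr (fun y hy => hall y (List.mem_append.mpr (Or.inl hy)))
        · intro w' hw'
          obtain ⟨hwm, hwgt, hwmin⟩ := hw w' hw'
          refine ⟨List.mem_append.mpr (Or.inl hwm), hwgt, ?_⟩
          intro y hy hlt
          rcases List.mem_append.mp hy with hy | hy
          · exact hwmin y hy hlt
          · simp at hy; subst hy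
            rcases hx2 with h | ⟨w, hw'', hle⟩
            · simp [pvInfLt] at hlt; omega
            · cases hw' ▸ hw''; omega

-- A's loop state over any score list satisfies the invariant
theorem pvLoop_inv (xs : List Int) :
    pvInv xs (xs.foldl pvStep ((none : Option Int), (none : Option Int), (0 : Int))).1
             (xs.foldl pvStep ((none : Option Int), (none : Option Int), (0 : Int))).2.1 := by
  induction xs using List.reverseRecOn with
  | nil =>
    refine ⟨by simp, by simp, by simp, by simp⟩
  | append_singleton xs x ih =>
    rw [List.foldl_append]
    simp only [List.foldl_cons, List.foldl_nil]
    exact pvStep_preserves (c := (List.foldl pvStep ((none : Option Int), (none : Option Int), (0 : Int)) xs).2.2) ih x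

-- the first two entries of sorted(set(xs)) satisfy the same invariant
theorem pvSorted_inv (xs : List Int) :
    pvInv xs (PySem.List.sorted (PySem.Set.ofList xs) (fun x => x) false)[0]?
             (PySem.List.sorted (PySem.Set.ofList xs) (fun x => x) false)[1]? := by
  have hmem : ∀ y, y ∈ PySem.List.sorted (PySem.Set.ofList xs) (fun x => x) false ↔ y ∈ xs := by
    intro y
    rw [PySem.List.mem_sorted, PySem.Set.mem_ofList]
  have hpair : (PySem.List.sorted (PySem.Set.ofList xs) (fun x => x) false).Pairwise (· < ·) :=
    PySem.List.sorted_ofList_pairwise_lt xs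
  match hsm : PySem.List.sorted (PySem.Set.ofList xs) (fun x => x) false with
  | [] =>
    rw [hsm] at hmem
    have hnil : xs = [] := by
      cases xs with
      | nil => rfl
      | cons a t => exact absurd ((hmem a).mpr (by simp)) (by simp)
    refine ⟨by simp [hnil], by simp, by simp [hnil], by simp⟩
  | [g0] =>
    rw [hsm] at hmem
    have hg0 : g0 ∈ xs := (hmem g0).mp (by simp)
    have honly : ∀ y ∈ xs, y = g0 := by
      intro y hy
      have : y ∈ ([g0] : List Int) := (hmem y).mpr hy
      simpa using this
    refine ⟨?_, ?_, ?_, by simp⟩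
    · simp only [List.getElem?_cons_zero]
      constructor
      · intro h; cases h
      · intro h; rw [h] at hg0; cases hg0
    · intro v hv
      simp only [List.getElem?_cons_zero, Option.some.injEq] at hv
      subst hv
      exact ⟨hg0, fun y hy => by rw [honly y hy]⟩
    · simp only [List.getElem?_cons_zero, List.getElem?_cons_succ, List.getElem?_nil]
      constructor
      · intro _ y hy
        rw [honly y hy]
        simp [pvInfLt]
      · intro _; trivial
  | g0 :: g1 :: t =>
    rw [hsm] at hmem
    rw [hsm] at hpair
    have hg0 : g0 ∈ xs := (hmem g0).mp (by simp)
    have hg1 : g1 ∈ xs := (hmem g1).mp (by simp)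
    have hlt : g0 < g1 := (List.pairwise_cons.mp hpair).1 g1 (by simp)
    have hmin : ∀ y ∈ xs, g0 ≤ y := by
      intro y hy
      have hym : y ∈ g0 :: g1 :: t := (hmem y).mpr hy
      rcases List.mem_cons.mp hym with h | hym
      · omega
      · have := (List.pairwise_cons.mp hpair).1 y hym; omega
    have hsec : ∀ y ∈ xs, g0 < y → g1 ≤ y := by
      intro y hy hgt
      have hym : y ∈ g0 :: g1 :: t := (hmem y).mpr hy
      rcases List.mem_cons.mp hym with h | hym
      · omega
      rcases List.mem_cons.mp hym with h | hym
      · omega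
      · have hp2 : (g1 :: t).Pairwise (· < ·) := (List.pairwise_cons.mp hpair).2
        have := (List.pairwise_cons.mp hp2).1 y hym; omega
    simp only [List.getElem?_cons_zero, List.getElem?_cons_succ]
    refine ⟨?_, ?_, ?_, ?_⟩
    · constructor
      · intro h; cases h
      · intro h; rw [h] at hg0; cases hg0
    · intro v hv
      simp only [Option.some.injEq] at hv
      subst hv
      exact ⟨hg0, hmin⟩
    · constructor
      · intro h; cases h
      · intro hall
        have := hall g1 hg1
        simp [pvInfLt] at this; omega
    · intro w hw
      simp only [Option.some.injEq] at hw
      subst hw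
      refine ⟨hg1, by simp [pvInfLt]; omega, ?_⟩
      intro y hy hlt'
      simp [pvInfLt] at hlt'
      exact hsec y hy hlt'

-- the loop state of the record's fold equals the fold over its score list
theorem pvFold_map (record : List (String × Int)) :
    record.foldl (fun st p => pvStep st p.2) ((none : Option Int), (none : Option Int), (0 : Int))
      = (record.map Prod.snd).foldl pvStep ((none : Option Int), (none : Option Int), (0 : Int)) := by
  rw [List.foldl_map]

-- ===== VERDICT (by name: the statement is the Claim_ definition above) =====
theorem find_second_lowest_students_spec : Claim_equal_find_second_lowest_students := by
  intro record _
  unfold Spec_find_second_lowest_students find_second_lowest_students find_second_lowest_students_alt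
  have hkey : (record.foldl (fun st p => pvStep st p.2) ((none : Option Int), (none : Option Int), (0 : Int))).2.1
      = (PySem.List.sorted (PySem.Set.ofList (record.map Prod.snd)) (fun x => x) false)[1]? := by
    rw [pvFold_map]
    exact (pvInv_unique (pvLoop_inv (record.map Prod.snd)) (pvSorted_inv (record.map Prod.snd))).2
  show record.foldl
      (fun acc p => if pvInfEq (record.foldl (fun st p => pvStep st p.2) ((none : Option Int), (none : Option Int), (0 : Int))).2.1 p.2 then acc ++ [p.1] else acc) [] = _
  rw [hkey]
  match hsm : PySem.List.sorted (PySem.Set.ofList (record.map Prod.snd)) (fun x => x) false with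
  | [] =>
    rw [PySem.List.foldl_append_if]
    simp [pvInfEq]
  | [g0] =>
    rw [PySem.List.foldl_append_if]
    simp [pvInfEq]
  | g0 :: g1 :: t =>
    rw [PySem.List.foldl_append_if]
    simp only [List.nil_append, List.getElem?_cons_zero, List.getElem?_cons_succ]
    congr 1
    apply List.filter_congr
    intro p _
    by_cases h : p.2 = g1
    · simp [pvInfEq, h]
    · simp [pvInfEq, h, Ne.symm h]
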